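-- pv_equiv track=rewrite | github.com/genzellab/UMAP | Distances/find_diValue.py | find_logic
-- ===== SOURCE A (Python) =====
-- def find_logic(rat, day, trial):
--     K=[]
--
--     for i in range(len(rat)):
--         for j in range(len(day)):
--             for k in range(len(trial)):
--                 logicresult=rat[i]*day[j]*trial[k]
--                 K.append(logicresult)
--
--     return K
-- ===== SOURCE B (Python) =====
-- def find_logic(rat, day, trial):
--     # Single flat loop over a linearized index space: decode (i, j, k) from
--     # one counter with // and %, instead of three nested loops.
--     m, k = len(day), len(trial)
--     mk = m * k
--     K = []
--     for idx in range(len(rat) * mk):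
--         K.append(rat[idx // mk] * day[(idx // k) % m] * trial[idx % k])
--     return K
-- ===== Notes on version B (the rewrite author's own statement) =====
-- stated objective: alternative
-- what changed: Replaced the triple-nested loop by a single flat loop over one linearized counter idx in range(len(rat)*len(day)*len(trial)), recovering the three indices arithmetically with // and % instead of nesting.
import Mathlib
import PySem

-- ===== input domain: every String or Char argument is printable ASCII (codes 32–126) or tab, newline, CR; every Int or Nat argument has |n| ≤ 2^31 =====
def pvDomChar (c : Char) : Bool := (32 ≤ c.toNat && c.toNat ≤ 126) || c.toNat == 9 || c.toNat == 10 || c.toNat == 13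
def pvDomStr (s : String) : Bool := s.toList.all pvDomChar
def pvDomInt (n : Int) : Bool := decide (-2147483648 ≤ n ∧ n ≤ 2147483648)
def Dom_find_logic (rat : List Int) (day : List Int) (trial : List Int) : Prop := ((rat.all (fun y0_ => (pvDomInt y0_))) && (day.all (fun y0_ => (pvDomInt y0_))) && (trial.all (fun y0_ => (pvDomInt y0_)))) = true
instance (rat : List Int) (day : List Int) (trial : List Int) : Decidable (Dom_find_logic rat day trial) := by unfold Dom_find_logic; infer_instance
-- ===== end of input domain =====

-- B replaces the triple-nested loop by one flat loop over a linearized counter decoded with // and % (objective: alternative decomposition).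

-- ===== PORT A =====
-- literal port of A: triple nested index loop appending rat[i]*day[j]*trial[k]
def find_logic (rat : List Int) (day : List Int) (trial : List Int) : List Int :=
  (PySem.List.pyRange 0 rat.length 1).foldl (fun K i =>
    (PySem.List.pyRange 0 day.length 1).foldl (fun K j =>
      (PySem.List.pyRange 0 trial.length 1).foldl (fun K k =>
        K ++ [PySem.List.pyGetD rat i 0 * PySem.List.pyGetD day j 0 * PySem.List.pyGetD trial k 0]) K) K) []

-- ===== PORT B =====
-- port of B: one flat loop over range(len(rat)*m*k); indices recovered with // and %
def find_logic_alt (rat : List Int) (day : List Int) (trial : List Int) : List Int :=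
  let m : Int := day.length
  let k : Int := trial.length
  let mk : Int := m * k
  (PySem.List.pyRange 0 ((rat.length : Int) * mk) 1).foldl (fun K idx =>
    K ++ [PySem.List.pyGetD rat (PySem.Int.floordiv idx mk) 0 *
          PySem.List.pyGetD day (PySem.Int.mod (PySem.Int.floordiv idx k) m) 0 *
          PySem.List.pyGetD trial (PySem.Int.mod idx k) 0]) []

-- ===== PRECONDITION & SPEC =====
def Spec_find_logic (rat : List Int) (day : List Int) (trial : List Int) (out : List Int) : Prop := out = find_logic_alt rat day trial
instance (rat : List Int) (day : List Int) (trial : List Int) (out : List Int) : Decidable (Spec_find_logic rat day trial out) := by unfold Spec_find_logic; infer_instance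

-- ===== CLAIM =====
def Claim_equal_find_logic : Prop := ∀ (rat : List Int) (day : List Int) (trial : List Int), Dom_find_logic rat day trial → Spec_find_logic rat day trial (find_logic rat day trial)

-- ===== LEMMAS AND PROOFS =====

-- mapping f over range(n*L) with index decoded as (p / L, p % L) is the nested two-level scan
theorem pv_range_mul_decode (n L : Nat) (f : Nat → Nat → Int) :
    (List.range (n * L)).map (fun p => f (p / L) (p % L)) =
      (List.range n).flatMap (fun i => (List.range L).map (fun j => f i j)) := by
  induction n with
  | zero => simp
  | succ n ih =>
    rcases Nat.eq_zero_or_pos L with hL | hL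
    · subst hL; simp
    · rw [Nat.succ_mul, List.range_add, List.map_append, ih, List.range_succ,
        List.flatMap_append]
      congr 1
      simp only [List.flatMap_singleton, List.map_map]
      apply List.map_congr_left
      intro j hj
      rw [List.mem_range] at hj
      have h1 : (n * L + j) / L = n := by
        rw [Nat.mul_comm n L, Nat.mul_add_div hL, Nat.div_eq_of_lt hj, Nat.add_zero]
      have h2 : (n * L + j) % L = j := by
        rw [Nat.mul_comm n L, Nat.mul_add_mod, Nat.mod_eq_of_lt hj]
      simp [h1, h2]

-- indexing a list through range(len(xs)) and mapping f is just mapping f over xs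
theorem pv_map_idx (xs : List Int) (f : Int → Int) :
    (PySem.List.pyRange 0 (xs.length : Int) 1).map (fun k => f (PySem.List.pyGetD xs k 0)) = xs.map f := by
  have : (fun k => f (PySem.List.pyGetD xs k 0)) = f ∘ (fun k => PySem.List.pyGetD xs k 0) := rfl
  rw [this, ← List.map_map, PySem.List.map_pyGetD_pyRange_zero']

-- same for a flatMap body
theorem pv_flatMap_idx (xs : List Int) (g : Int → List Int) :
    (PySem.List.pyRange 0 (xs.length : Int) 1).flatMap (fun k => g (PySem.List.pyGetD xs k 0)) = xs.flatMap g := by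
  conv_rhs => rw [← PySem.List.map_pyGetD_pyRange_zero' xs 0]
  rw [List.flatMap_map]

-- a flatMap over a list is the flatMap over range(len) through getD
theorem pv_flatMap_getD (xs : List Int) (g : Int → List Int) :
    (List.range xs.length).flatMap (fun i => g (xs.getD i 0)) = xs.flatMap g := by
  induction xs with
  | nil => simp
  | cons x xs ih =>
    rw [List.length_cons, List.range_succ_eq_map, List.flatMap_cons, List.flatMap_map]
    simp only [List.getD_cons_zero, List.getD_cons_succ]
    rw [ih, List.flatMap_cons]

-- a map over a list is the map over range(len) through getD
theorem pv_map_getD (xs : List Int) (f : Int → Int) :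
    (List.range xs.length).map (fun i => f (xs.getD i 0)) = xs.map f := by
  induction xs with
  | nil => simp
  | cons x xs ih =>
    rw [List.length_cons, List.range_succ_eq_map, List.map_cons, List.map_map]
    simp only [Function.comp_def, List.getD_cons_zero, List.getD_cons_succ]
    rw [ih, List.map_cons]

-- decode once: peel the rat index off the linearized counter
theorem pv_decode_rat (rat day trial : List Int) :
    (List.range (rat.length * (day.length * trial.length))).map
      (fun p => rat.getD (p / (day.length * trial.length)) 0 *
                day.getD (p % (day.length * trial.length) / trial.length) 0 *
                trial.getD (p % (day.length * trial.length) % trial.length) 0)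
    = (List.range rat.length).flatMap (fun i =>
        (List.range (day.length * trial.length)).map (fun q =>
          rat.getD i 0 * day.getD (q / trial.length) 0 * trial.getD (q % trial.length) 0)) :=
  pv_range_mul_decode rat.length (day.length * trial.length)
    (fun i q => rat.getD i 0 * day.getD (q / trial.length) 0 * trial.getD (q % trial.length) 0)

-- decode again: split the remaining counter into day and trial indices
theorem pv_decode_day (c : Int) (day trial : List Int) :
    (List.range (day.length * trial.length)).map (fun q =>
      c * day.getD (q / trial.length) 0 * trial.getD (q % trial.length) 0)
    = (List.range day.length).flatMap (fun j =>
        (List.range trial.length).map (fun l => c * day.getD j 0 * trial.getD l 0)) :=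
  pv_range_mul_decode day.length trial.length
    (fun j l => c * day.getD j 0 * trial.getD l 0)

-- ===== VERDICT =====
theorem find_logic_spec : Claim_equal_find_logic := by
  intro rat day trial _
  unfold Spec_find_logic find_logic find_logic_alt
  simp only [PySem.List.foldl_append_singleton_eq_map, PySem.List.foldl_append_eq_flatMap,
    List.nil_append]
  -- A side: nested pyRanges with pyGetD → nested flatMaps directly over the lists
  have e3 : ∀ (i j : Int),
      (PySem.List.pyRange 0 (trial.length : Int) 1).map
          (fun k => PySem.List.pyGetD rat i 0 * PySem.List.pyGetD day j 0 * PySem.List.pyGetD trial k 0)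
        = trial.map (fun t => PySem.List.pyGetD rat i 0 * PySem.List.pyGetD day j 0 * t) :=
    fun i j => pv_map_idx trial (fun t => PySem.List.pyGetD rat i 0 * PySem.List.pyGetD day j 0 * t)
  simp only [e3]
  have e2 : ∀ (i : Int),
      (PySem.List.pyRange 0 (day.length : Int) 1).flatMap
          (fun j => trial.map (fun t => PySem.List.pyGetD rat i 0 * PySem.List.pyGetD day j 0 * t))
        = day.flatMap (fun d => trial.map (fun t => PySem.List.pyGetD rat i 0 * d * t)) :=
    fun i => pv_flatMap_idx day (fun d => trial.map (fun t => PySem.List.pyGetD rat i 0 * d * t))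
  simp only [e2]
  rw [pv_flatMap_idx rat (fun r => day.flatMap (fun d => trial.map (fun t => r * d * t)))]
  -- B side: the Int pyRange is the Nat range cast in
  have hB : PySem.List.pyRange 0 ((rat.length : Int) * ((day.length : Int) * (trial.length : Int))) 1
      = List.map (fun p : Nat => (p : Int)) (List.range (rat.length * (day.length * trial.length))) := by
    rw [PySem.List.pyRange_one, Int.sub_zero]
    have hN : ((rat.length : Int) * ((day.length : Int) * (trial.length : Int)))
        = ((rat.length * (day.length * trial.length) : Nat) : Int) := by push_cast; ring
    rw [hN, Int.toNat_natCast]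
    simp only [zero_add]
  rw [hB, List.map_map, Function.comp_def]
  -- turn the Int-arithmetic body at a cast index into pure Nat arithmetic
  have hbody : ∀ p : Nat,
      PySem.List.pyGetD rat (PySem.Int.floordiv (p : Int) ((day.length : Int) * (trial.length : Int))) 0 *
        PySem.List.pyGetD day (PySem.Int.mod (PySem.Int.floordiv (p : Int) (trial.length : Int)) (day.length : Int)) 0 *
        PySem.List.pyGetD trial (PySem.Int.mod (p : Int) (trial.length : Int)) 0
      = rat.getD (p / (day.length * trial.length)) 0 *
          day.getD (p % (day.length * trial.length) / trial.length) 0 *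
          trial.getD (p % (day.length * trial.length) % trial.length) 0 := by
    intro p
    have h1 : ((day.length : Int) * (trial.length : Int)) = ((day.length * trial.length : Nat) : Int) := by
      push_cast; ring
    rw [h1, PySem.Int.floordiv_natCast, PySem.Int.floordiv_natCast, PySem.Int.mod_natCast,
      PySem.Int.mod_natCast]
    simp only [PySem.List.pyGetD_natCast]
    have e1 : p % (day.length * trial.length) / trial.length = p / trial.length % day.length := by
      rw [Nat.mul_comm day.length trial.length, Nat.mod_mul_right_div_self]
    have e2 : p % (day.length * trial.length) % trial.length = p % trial.length := by
      rw [Nat.mul_comm day.length trial.length, Nat.mod_mul_right_mod]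
    rw [e1, e2]
  rw [List.map_congr_left (fun p _ => hbody p), pv_decode_rat]
  simp only [pv_decode_day]
  -- convert the range/getD nests back to scans over the lists themselves
  have g3 : ∀ (i j : Nat),
      (List.range trial.length).map (fun l => rat.getD i 0 * day.getD j 0 * trial.getD l 0)
        = trial.map (fun t => rat.getD i 0 * day.getD j 0 * t) :=
    fun i j => pv_map_getD trial (fun t => rat.getD i 0 * day.getD j 0 * t)
  simp only [g3]
  have g2 : ∀ (i : Nat),
      (List.range day.length).flatMap (fun j => trial.map (fun t => rat.getD i 0 * day.getD j 0 * t))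
        = day.flatMap (fun d => trial.map (fun t => rat.getD i 0 * d * t)) :=
    fun i => pv_flatMap_getD day (fun d => trial.map (fun t => rat.getD i 0 * d * t))
  simp only [g2]
  rw [pv_flatMap_getD rat (fun r => day.flatMap (fun d => trial.map (fun t => r * d * t)))]
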